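-- pv_equiv track=rewrite | github.com/incolume-jedi/academia-jedi | incolume/academia_jedi/ajedi20231023_estrutura_decisao/estrutura_decisao.py | exercicio19
-- ===== SOURCE A (Python) =====
-- def exercicio19(num: int) -> str:
--     """Faça um Programa que leia um número inteiro menor que 1000
--     e imprima a quantidade de centenas, dezenas e unidades do mesmo.
--
--     Observando os termos no plural a colocação do "e", da vírgula entre outros.
--
--      Exemplo:
--         326 = 3 centenas, 2 dezenas e 6 unidades
--         12 = 1 dezena e 2 unidades
--
--     Testar com:
--     326, 300, 100, 320, 310,305, 301, 101, 311,
--     111, 25, 20, 10, 21, 11, 1, 7 e 16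
--     """
--     classes = ['unidade', 'dezena', 'centena']
--     algarismos = []
--     result = ''
--     while num > 0:
--         algarismos.append(num % 10)
--         num //= 10
--     if len(algarismos) > 3:
--         raise ValueError('0 < num < 1000')
--
--     for n, c in zip(algarismos, classes):
--         result = (f'{n} {c}s ' if n > 1 else f'{n} {c} ') + result
--     return result.strip()
-- ===== SOURCE B (Python) =====
-- def exercicio19(num: int) -> str:
--     if num <= 0:
--         return ''
--     s = str(num)
--     if len(s) > 3:
--         raise ValueError('0 < num < 1000')
--     names = ['unidade', 'dezena', 'centena']
--     n = len(s)
--     parts = []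
--     for i, ch in enumerate(s):
--         d = int(ch)
--         cls = names[n - 1 - i]
--         parts.append(f'{d} {cls}s' if d > 1 else f'{d} {cls}')
--     return ' '.join(parts)
-- ===== Notes on version B (the rewrite author's own statement) =====
-- stated objective: idiomatic
-- what changed: B replaces A's while-loop of modular digit extraction plus string-prepending and final strip with a direct left-to-right traversal of str(num) using a place-name table lookup and ' '.join of the parts, with an early return '' for num <= 0.
import Mathlib
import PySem

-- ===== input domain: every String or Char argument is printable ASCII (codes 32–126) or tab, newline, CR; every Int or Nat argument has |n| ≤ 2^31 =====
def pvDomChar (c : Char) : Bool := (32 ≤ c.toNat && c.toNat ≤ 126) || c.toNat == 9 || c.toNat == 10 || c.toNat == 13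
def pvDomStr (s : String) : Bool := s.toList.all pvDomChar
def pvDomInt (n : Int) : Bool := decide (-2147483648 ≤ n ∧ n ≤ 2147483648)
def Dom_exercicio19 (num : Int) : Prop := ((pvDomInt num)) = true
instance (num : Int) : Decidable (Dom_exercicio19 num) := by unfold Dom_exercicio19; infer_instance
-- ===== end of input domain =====

-- B is the more idiomatic version: guard num ≤ 0, traverse the digits of str(num)
-- left-to-right with a place-name lookup, and ' '.join the parts (A extracts digits
-- by repeated % / // and prepends to an accumulator string).

-- ===== PORT A =====
-- while num > 0: algarismos.append(num % 10); num //= 10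
-- (the fuel num.toNat + 1 only bounds the recursion; it never runs out, since num // 10 < num for num > 0)
def pvDigitsA : Nat → Int → List Int
  | 0, _ => []
  | fuel + 1, num =>
    if num > 0 then
      PySem.Int.mod num 10 :: pvDigitsA fuel (PySem.Int.floordiv num 10)
    else []

def exercicio19 (num : Int) : String :=
  let classes : List String := ["unidade", "dezena", "centena"]
  let algarismos := pvDigitsA (num.toNat + 1) num
  if algarismos.length > 3 then ""  -- raise ValueError('0 < num < 1000'): excluded by Pre_
  else
    let result := (algarismos.zip classes).foldl
      (fun result nc =>
        (if nc.1 > 1 then PySem.Int.toStr nc.1 ++ " " ++ nc.2 ++ "s "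
         else PySem.Int.toStr nc.1 ++ " " ++ nc.2 ++ " ") ++ result) ""
    PySem.Str.strip result

-- ===== PORT B =====
def exercicio19_alt (num : Int) : String :=
  if num ≤ 0 then ""
  else
    let s := PySem.Int.toChars num
    if s.length > 3 then ""  -- raise ValueError('0 < num < 1000'): excluded by Pre_
    else
      let names : List String := ["unidade", "dezena", "centena"]
      let n := s.length
      let parts := (PySem.List.enumerate s).map (fun ic =>
        -- int(ch): exact for the decimal digit characters str(num) yields here
        let d : Int := (ic.2.toNat : Int) - 48
        let cls := PySem.List.pyGetD names ((n : Int) - 1 - ic.1) ""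
        if d > 1 then PySem.Int.toStr d ++ " " ++ cls ++ "s"
        else PySem.Int.toStr d ++ " " ++ cls)
      PySem.Str.join " " parts

-- ===== PRECONDITION & SPEC =====
-- Pre_ excludes exactly num ≥ 1000, where A raises ValueError('0 < num < 1000').
def Pre_exercicio19 (num : Int) : Prop := num < 1000
instance (num : Int) : Decidable (Pre_exercicio19 num) := by unfold Pre_exercicio19; infer_instance
def pvWitness_exercicio19 : Int := (326)

def Spec_exercicio19 (num : Int) (out : String) : Prop := out = exercicio19_alt num
instance (num : Int) (out : String) : Decidable (Spec_exercicio19 num out) := by unfold Spec_exercicio19; infer_instance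

-- ===== CLAIM (what is proved, stated in full; the proofs are below) =====
def Claim_equal_exercicio19 : Prop := ∀ (num : Int), Dom_exercicio19 num → Pre_exercicio19 num → Spec_exercicio19 num (exercicio19 num)

-- ===== LEMMAS AND PROOFS =====
theorem dA_nonpos (f : Nat) (x : Int) (h : x ≤ 0) : pvDigitsA f x = [] := by
  cases f <;> simp [pvDigitsA, show ¬ x > 0 by omega]

theorem dA_step (f : Nat) (x : Int) (hx : 0 < x) :
    pvDigitsA (f + 1) x = PySem.Int.mod x 10 :: pvDigitsA f (PySem.Int.floordiv x 10) := by
  simp [pvDigitsA, hx]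

theorem modc (k : Nat) : PySem.Int.mod (k : Int) 10 = ((k % 10 : Nat) : Int) := by
  rw [PySem.Int.mod_eq_emod_of_pos (by omega)]; omega

theorem fdc (k : Nat) : PySem.Int.floordiv (k : Int) 10 = ((k / 10 : Nat) : Int) := by
  rw [PySem.Int.floordiv_eq_ediv_of_pos (by omega)]; omega

theorem digits1 (n : Nat) (h1 : 1 ≤ n) (h2 : n < 10) :
    pvDigitsA (n + 1) (n : Int) = [((n % 10 : Nat) : Int)] := by
  rw [dA_step n _ (by omega), modc, fdc, dA_nonpos n _ (by omega)]

theorem digits2 (n : Nat) (h1 : 10 ≤ n) (h2 : n < 100) :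
    pvDigitsA (n + 1) (n : Int) = [((n % 10 : Nat) : Int), ((n / 10 % 10 : Nat) : Int)] := by
  obtain ⟨f, hf⟩ : ∃ f, n = f + 1 := ⟨n - 1, by omega⟩
  rw [dA_step n _ (by omega), modc, fdc, hf, dA_step f _ (by omega), modc, fdc,
    dA_nonpos f _ (by omega), ← hf]

theorem digits3 (n : Nat) (h1 : 100 ≤ n) (h2 : n < 1000) :
    pvDigitsA (n + 1) (n : Int) =
      [((n % 10 : Nat) : Int), ((n / 10 % 10 : Nat) : Int), ((n / 100 % 10 : Nat) : Int)] := by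
  obtain ⟨f, hf⟩ : ∃ f, n = f + 1 := ⟨n - 1, by omega⟩
  obtain ⟨g, hg⟩ : ∃ g, f = g + 1 := ⟨f - 1, by omega⟩
  rw [dA_step n _ (by omega), modc, fdc, hf, dA_step f _ (by omega), modc, fdc, hg,
    dA_step g _ (by omega), modc, fdc, dA_nonpos g _ (by omega), ← hg, ← hf,
    show n / 10 / 10 = n / 100 from by omega]

theorem tdc_small (f n : Nat) (ds : List Char) (h : n < 10) :
    Nat.toDigitsCore 10 (f + 1) n ds = n.digitChar :: ds := by
  simp [Nat.toDigitsCore, Nat.mod_eq_of_lt h, Nat.div_eq_of_lt h]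

theorem tdc_step (f n : Nat) (ds : List Char) (h : 10 ≤ n) :
    Nat.toDigitsCore 10 (f + 1) n ds = Nat.toDigitsCore 10 f (n / 10) ((n % 10).digitChar :: ds) := by
  have : n / 10 ≠ 0 := by omega
  simp [Nat.toDigitsCore, this]

theorem toChars_nat (n : Nat) : PySem.Int.toChars (n : Int) = Nat.toDigits 10 n := by
  simp [PySem.Int.toChars, show ¬ ((n:Int) < 0) by omega]

theorem toChars1 (n : Nat) (h1 : n < 10) :
    PySem.Int.toChars (n : Int) = [n.digitChar] := by
  rw [toChars_nat]; unfold Nat.toDigits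
  exact tdc_small n n [] h1

theorem toChars2 (n : Nat) (h1 : 10 ≤ n) (h2 : n < 100) :
    PySem.Int.toChars (n : Int) = [(n / 10).digitChar, (n % 10).digitChar] := by
  rw [toChars_nat]; unfold Nat.toDigits
  rw [tdc_step n n [] h1]
  obtain ⟨f, rfl⟩ : ∃ f, n = f + 1 := ⟨n - 1, by omega⟩
  exact tdc_small f _ _ (by omega)

theorem toChars3 (n : Nat) (h1 : 100 ≤ n) (h2 : n < 1000) :
    PySem.Int.toChars (n : Int) = [(n / 100).digitChar, (n / 10 % 10).digitChar, (n % 10).digitChar] := by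
  rw [toChars_nat]; unfold Nat.toDigits
  rw [tdc_step n n [] (by omega)]
  obtain ⟨f, hf⟩ : ∃ f, n = f + 1 := ⟨n - 1, by omega⟩
  rw [hf, tdc_step f _ _ (by omega)]
  obtain ⟨g, hg⟩ : ∃ g, f = g + 1 := ⟨f - 1, by omega⟩
  rw [hg, tdc_small g _ _ (by omega)]
  rw [← hg, ← hf, Nat.div_div_eq_div_mul]

theorem digitChar_sub48 (k : Nat) (h : k < 10) :
    ((k.digitChar.toNat : Int) - 48) = (k : Int) := by
  interval_cases k <;> decide

theorem digitChar_nonspace (k : Nat) (h : k < 10) :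
    PySem.Chars.isspace k.digitChar = false := by
  interval_cases k <;> decide

theorem isspace_space : PySem.Chars.isspace ' ' = true := by decide
theorem isspace_s : PySem.Chars.isspace 's' = false := by decide
theorem isspace_e : PySem.Chars.isspace 'e' = false := by decide
theorem isspace_a : PySem.Chars.isspace 'a' = false := by decide

theorem eq_nonpos (num : Int) (h : num ≤ 0) : exercicio19 num = exercicio19_alt num := by
  unfold exercicio19 exercicio19_alt
  rw [dA_nonpos _ num h]
  simp [show num ≤ 0 by omega]
  decide

set_option maxHeartbeats 1000000 in
theorem case1 (m : Int) (h1 : 1 ≤ m) (h2 : m < 10) : exercicio19 m = exercicio19_alt m := by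
  obtain ⟨n, rfl, hn1, hn2⟩ : ∃ n : Nat, m = (n : Int) ∧ 1 ≤ n ∧ n < 10 :=
    ⟨m.toNat, by omega, by omega, by omega⟩
  unfold exercicio19 exercicio19_alt
  rw [show ((n:Int)).toNat = n from by omega, digits1 n hn1 hn2, toChars1 n hn2,
    show n % 10 = n from by omega]
  simp only [show ¬ ((n:Int) ≤ 0) by omega, if_false, List.length, PySem.List.enumerate,
    List.map, List.zip, List.zipWith, List.foldl, PySem.List.pyGetD]
  rw [digitChar_sub48 n (by omega),
    show PySem.Int.toStr ((n : Nat) : Int) = String.ofList [(n).digitChar] from by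
      unfold PySem.Int.toStr; rw [toChars1 _ (by omega)]]
  have hc1 : PySem.Chars.isspace n.digitChar = false := digitChar_nonspace _ (by omega)
  generalize hg1 : n.digitChar = c1 at hc1 ⊢
  split_ifs <;>
    first
    | (exact absurd ‹0 + 1 > 3› (by omega))
    | · simp only [PySem.Str.strip, PySem.Str.join]
        refine congrArg String.ofList ?_
        simp [String.toList_append, PySem.Chars.strip, PySem.Chars.lstrip, PySem.Chars.rstrip,
          PySem.Chars.join, List.intercalate, List.dropWhile, hc1,
          isspace_space, isspace_s, isspace_e, isspace_a]

set_option maxHeartbeats 1000000 in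
theorem case2 (m : Int) (h1 : 10 ≤ m) (h2 : m < 100) : exercicio19 m = exercicio19_alt m := by
  obtain ⟨n, rfl, hn1, hn2⟩ : ∃ n : Nat, m = (n : Int) ∧ 10 ≤ n ∧ n < 100 :=
    ⟨m.toNat, by omega, by omega, by omega⟩
  unfold exercicio19 exercicio19_alt
  rw [show ((n:Int)).toNat = n from by omega, digits2 n hn1 hn2, toChars2 n hn1 hn2,
    show n / 10 % 10 = n / 10 from by omega]
  simp only [show ¬ ((n:Int) ≤ 0) by omega, if_false, List.length, PySem.List.enumerate,
    List.map, List.zip, List.zipWith, List.foldl, PySem.List.pyGetD]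
  rw [digitChar_sub48 (n % 10) (by omega), digitChar_sub48 (n / 10) (by omega),
    show PySem.Int.toStr ((n % 10 : Nat) : Int) = String.ofList [(n % 10).digitChar] from by
      unfold PySem.Int.toStr; rw [toChars1 _ (by omega)],
    show PySem.Int.toStr ((n / 10 : Nat) : Int) = String.ofList [(n / 10).digitChar] from by
      unfold PySem.Int.toStr; rw [toChars1 _ (by omega)]]
  have hc1 : PySem.Chars.isspace (n % 10).digitChar = false := digitChar_nonspace _ (by omega)
  have hc2 : PySem.Chars.isspace (n / 10).digitChar = false := digitChar_nonspace _ (by omega)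
  generalize hg1 : (n % 10).digitChar = c1 at hc1 ⊢
  generalize hg2 : (n / 10).digitChar = c2 at hc2 ⊢
  split_ifs <;>
    first
    | (exact absurd ‹0 + 1 + 1 > 3› (by omega))
    | · simp only [PySem.Str.strip, PySem.Str.join]
        refine congrArg String.ofList ?_
        simp [String.toList_append, PySem.Chars.strip, PySem.Chars.lstrip, PySem.Chars.rstrip,
          PySem.Chars.join, List.intercalate, List.dropWhile, hc1, hc2,
          isspace_space, isspace_s, isspace_e, isspace_a]

set_option maxHeartbeats 2000000 in
theorem case3 (m : Int) (h1 : 100 ≤ m) (h2 : m < 1000) : exercicio19 m = exercicio19_alt m := by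
  obtain ⟨n, rfl, hn1, hn2⟩ : ∃ n : Nat, m = (n : Int) ∧ 100 ≤ n ∧ n < 1000 :=
    ⟨m.toNat, by omega, by omega, by omega⟩
  unfold exercicio19 exercicio19_alt
  rw [show ((n:Int)).toNat = n from by omega, digits3 n hn1 hn2, toChars3 n hn1 hn2,
    show n / 100 % 10 = n / 100 from by omega]
  simp only [show ¬ ((n:Int) ≤ 0) by omega, if_false, List.length, PySem.List.enumerate,
    List.map, List.zip, List.zipWith, List.foldl, PySem.List.pyGetD]
  rw [digitChar_sub48 (n % 10) (by omega), digitChar_sub48 (n / 10 % 10) (by omega),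
    digitChar_sub48 (n / 100) (by omega),
    show PySem.Int.toStr ((n % 10 : Nat) : Int) = String.ofList [(n % 10).digitChar] from by
      unfold PySem.Int.toStr; rw [toChars1 _ (by omega)],
    show PySem.Int.toStr ((n / 10 % 10 : Nat) : Int) = String.ofList [(n / 10 % 10).digitChar] from by
      unfold PySem.Int.toStr; rw [toChars1 _ (by omega)],
    show PySem.Int.toStr ((n / 100 : Nat) : Int) = String.ofList [(n / 100).digitChar] from by
      unfold PySem.Int.toStr; rw [toChars1 _ (by omega)]]
  have hc1 : PySem.Chars.isspace (n % 10).digitChar = false := digitChar_nonspace _ (by omega)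
  have hc2 : PySem.Chars.isspace (n / 10 % 10).digitChar = false := digitChar_nonspace _ (by omega)
  have hc3 : PySem.Chars.isspace (n / 100).digitChar = false := digitChar_nonspace _ (by omega)
  generalize hg1 : (n % 10).digitChar = c1 at hc1 ⊢
  generalize hg2 : (n / 10 % 10).digitChar = c2 at hc2 ⊢
  generalize hg3 : (n / 100).digitChar = c3 at hc3 ⊢
  split_ifs <;>
    first
    | (exact absurd ‹0 + 1 + 1 + 1 > 3› (by omega))
    | · simp only [PySem.Str.strip, PySem.Str.join]
        refine congrArg String.ofList ?_
        simp [String.toList_append, PySem.Chars.strip, PySem.Chars.lstrip, PySem.Chars.rstrip,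
          PySem.Chars.join, List.intercalate, List.dropWhile, hc1, hc2, hc3,
          isspace_space, isspace_s, isspace_e, isspace_a]

-- ===== VERDICT (by name: the statement is the Claim_ definition above) =====
theorem exercicio19_spec : Claim_equal_exercicio19 := by
  intro num _ hpre
  unfold Spec_exercicio19
  unfold Pre_exercicio19 at hpre
  by_cases h : num ≤ 0
  · exact eq_nonpos num h
  · by_cases h10 : num < 10
    · exact case1 num (by omega) h10
    · by_cases h100 : num < 100
      · exact case2 num (by omega) h100
      · exact case3 num (by omega) hpre
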